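-- pv_equiv track=rewrite | github.com/duanebester/nnzap | reference/mlx_bonsai_q4_golden.py | format_zig_array
-- ===== SOURCE A (Python) =====
-- def format_zig_array(token_ids: list[int]) -> str:
--     """Format token IDs as a Zig array literal."""
--     count = len(token_ids)
--     lines = [
--         f"const GOLDEN_TOKEN_COUNT: u32 = {count};",
--         "",
--         "const GOLDEN_TOKENS = [GOLDEN_TOKEN_COUNT]u32{",
--     ]
--
--     # Wrap every 10 entries.
--     for i in range(0, count, 10):
--         chunk = token_ids[i : i + 10]
--         parts = []
--         for j, tok in enumerate(chunk):
--             idx = i + j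
--             if idx + 1 < count:
--                 parts.append(f"{tok}, ")
--             else:
--                 parts.append(f"{tok},")
--         lines.append("    " + "".join(parts))
--
--     lines.append("};")
--     return "\n".join(lines)
-- ===== SOURCE B (Python) =====
-- def format_zig_array(token_ids: list[int]) -> str:
--     """Format token IDs as a Zig array literal."""
--     count = len(token_ids)
--     out = [
--         f"const GOLDEN_TOKEN_COUNT: u32 = {count};\n"
--         "\n"
--         "const GOLDEN_TOKENS = [GOLDEN_TOKEN_COUNT]u32{"
--     ]
--     # One flat pass over all tokens: a new line starts before every 10th token,
--     # and each token carries its own separator (final token: ",", otherwise ", ").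
--     for idx, tok in enumerate(token_ids):
--         if idx % 10 == 0:
--             out.append("\n    ")
--         out.append(str(tok) + ("," if idx + 1 == count else ", "))
--     out.append("\n};")
--     return "".join(out)
-- ===== Notes on version B (the rewrite author's own statement) =====
-- stated objective: alternative
-- what changed: Replaces A's chunked two-level construction (outer loop over 10-slices, inner enumerate loop, list of lines joined by newline) with a single flat pass over enumerate(token_ids) that emits a line-break token before every 10th element and one separator per element, joined by the empty string.
import Mathlib
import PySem

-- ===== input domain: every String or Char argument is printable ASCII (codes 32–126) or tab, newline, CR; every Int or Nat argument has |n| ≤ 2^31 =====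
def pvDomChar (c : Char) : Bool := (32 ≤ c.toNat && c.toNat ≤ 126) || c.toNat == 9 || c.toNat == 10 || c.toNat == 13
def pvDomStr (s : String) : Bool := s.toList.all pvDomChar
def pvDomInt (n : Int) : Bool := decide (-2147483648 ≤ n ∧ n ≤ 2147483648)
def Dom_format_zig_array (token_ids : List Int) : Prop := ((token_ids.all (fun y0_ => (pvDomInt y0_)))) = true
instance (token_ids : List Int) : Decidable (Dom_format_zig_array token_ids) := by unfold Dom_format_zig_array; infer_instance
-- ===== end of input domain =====

-- B replaces A's chunked two-level construction (outer loop over 10-slices, inner enumerate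
-- loop, lines joined by '\n') by ONE flat pass over enumerate(token_ids) that emits a
-- "\n    " break before every 10th token and one separator per token, joined by "".
-- Same O(n) cost; a different decomposition of the same output.
-- Ports work on List Char (PySem.Chars) and wrap with String.ofList at the end.

-- ===== PORT A =====
def format_zig_array (token_ids : List Int) : String :=
  let count : Int := token_ids.length
  let lines : List (List Char) :=
    [ "const GOLDEN_TOKEN_COUNT: u32 = ".toList ++ PySem.Int.toChars count ++ ";".toList,
      [],
      "const GOLDEN_TOKENS = [GOLDEN_TOKEN_COUNT]u32{".toList ]
  -- for i in range(0, count, 10): …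
  let lines := (PySem.List.pyRange 0 count 10).foldl (fun lines i =>
    let chunk := PySem.List.slice token_ids (some i) (some (i + 10))
    -- for j, tok in enumerate(chunk): …
    let parts := (PySem.List.enumerate chunk 0).foldl (fun parts jt =>
      let idx := i + jt.1
      if idx + 1 < count then parts ++ [PySem.Int.toChars jt.2 ++ ", ".toList]
      else parts ++ [PySem.Int.toChars jt.2 ++ ",".toList]) ([] : List (List Char))
    lines ++ ["    ".toList ++ PySem.Chars.join [] parts]) lines
  let lines := lines ++ ["};".toList]
  String.ofList (PySem.Chars.join ['\n'] lines)

-- ===== PORT B =====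
def format_zig_array_alt (token_ids : List Int) : String :=
  let count : Int := token_ids.length
  let out : List (List Char) :=
    [ "const GOLDEN_TOKEN_COUNT: u32 = ".toList ++ PySem.Int.toChars count
        ++ ";\n\nconst GOLDEN_TOKENS = [GOLDEN_TOKEN_COUNT]u32{".toList ]
  -- for idx, tok in enumerate(token_ids): …
  let out := (PySem.List.enumerate token_ids 0).foldl (fun out kt =>
    let out := if PySem.Int.mod kt.1 10 == 0 then out ++ ["\n    ".toList] else out
    out ++ [PySem.Int.toChars kt.2 ++
      (if kt.1 + 1 == count then ",".toList else ", ".toList)]) out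
  let out := out ++ ["\n};".toList]
  String.ofList (PySem.Chars.join [] out)

-- ===== PRECONDITION & SPEC =====
def Spec_format_zig_array (token_ids : List Int) (out : String) : Prop := out = format_zig_array_alt token_ids
instance (token_ids : List Int) (out : String) : Decidable (Spec_format_zig_array token_ids out) := by unfold Spec_format_zig_array; infer_instance

-- ===== CLAIM =====
def Claim_equal_format_zig_array : Prop := ∀ (token_ids : List Int), Dom_format_zig_array token_ids → Spec_format_zig_array token_ids (format_zig_array token_ids)

-- ===== LEMMAS AND PROOFS =====

-- ''.join(xs) is the flattening of xs
theorem pv_join_nil : ∀ (xs : List (List Char)), PySem.Chars.join [] xs = xs.flatten := by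
  intro xs
  induction xs with
  | nil => simp [PySem.Chars.join_nil]
  | cons p rest ih =>
    cases rest with
    | nil => simp [PySem.Chars.join_singleton]
    | cons q rest' => rw [PySem.Chars.join_cons_cons]; simp [ih]

-- '\n'.join(x :: ls) prefixes every later element with '\n'
theorem pv_join_newline : ∀ (ls : List (List Char)) (x : List Char),
    PySem.Chars.join ['\n'] (x :: ls) = x ++ ls.flatMap (fun l => '\n' :: l) := by
  intro ls
  induction ls with
  | nil => intro x; simp [PySem.Chars.join_singleton]
  | cons y rest ih =>
    intro x
    rw [PySem.Chars.join_cons_cons, ih y]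
    simp

-- range(a, b, 10) peels its first element when a < b
theorem pv_pyRange_ten_cons (a b : Int) (h : a < b) :
    PySem.List.pyRange a b 10 = a :: PySem.List.pyRange (a + 10) b 10 := by
  rw [PySem.List.pyRange_of_pos a b (by norm_num),
      PySem.List.pyRange_of_pos (a + 10) b (by norm_num)]
  have hn : (if a < b then ((b - a + 10 - 1) / 10).toNat else 0)
      = (if a + 10 < b then ((b - (a + 10) + 10 - 1) / 10).toNat else 0) + 1 := by
    rw [if_pos h]
    by_cases h2 : a + 10 < b
    · rw [if_pos h2]
      have : (b - a + 10 - 1) / 10 = (b - (a + 10) + 10 - 1) / 10 + 1 := by omega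
      rw [this]; omega
    · rw [if_neg h2]
      have : (b - a + 10 - 1) / 10 = 1 := by omega
      rw [this]; rfl
  rw [hn, List.range_succ_eq_map]
  simp only [List.map_cons, List.map_map, Nat.cast_zero, mul_zero, add_zero]
  congr 1
  apply List.map_congr_left
  intro k _
  simp only [Function.comp, Nat.succ_eq_add_one]
  push_cast
  ring

-- indices s+1, …, s+9 are not multiples of 10 when 10 ∣ s: the tail of a chunk,
-- enumerated from offset j on the A side and from s+j on the B side, agrees.
theorem pv_chunk_tail (c : Int) : ∀ (ts : List Int) (s j : Int), 0 ≤ s → (10 : Int) ∣ s →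
    1 ≤ j → j + ts.length ≤ 10 → s + j + ts.length ≤ c →
    (PySem.List.enumerate ts j).flatMap (fun jt =>
        PySem.Int.toChars jt.2 ++ (if s + jt.1 + 1 < c then ", ".toList else ",".toList))
    = (PySem.List.enumerate ts (s + j)).flatMap (fun kt =>
        (if PySem.Int.mod kt.1 10 == 0 then "\n    ".toList else []) ++
        (PySem.Int.toChars kt.2 ++ (if kt.1 + 1 == c then ",".toList else ", ".toList))) := by
  intro ts
  induction ts with
  | nil => intro s j _ _ _ _ _; simp [PySem.List.enumerate_nil]
  | cons t ts ih =>
    intro s j hs hdvd hj hj10 hc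
    simp only [List.length_cons] at hj10 hc
    have hlen : (0:Int) ≤ (ts.length : Int) := by positivity
    push_cast at hj10 hc
    rw [PySem.List.enumerate_cons, PySem.List.enumerate_cons, List.flatMap_cons, List.flatMap_cons]
    have hmod : ¬ (PySem.Int.mod (s + j) 10 == 0) = true := by
      simp only [beq_iff_eq, PySem.Int.mod_eq_zero_iff_dvd]
      omega
    rw [if_neg hmod]
    have hsep : (if s + j + 1 < c then ", ".toList else ",".toList)
        = (if s + j + 1 == c then ",".toList else ", ".toList) := by
      by_cases he : s + j + 1 = c
      · rw [if_neg (by omega), if_pos (by simpa using he)]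
      · rw [if_pos (by omega), if_neg (by simpa using he)]
    have hrec := ih s (j + 1) hs hdvd (by omega) (by omega) (by omega)
    rw [hsep, hrec]
    have : s + j + 1 = s + (j + 1) := by ring
    rw [this]
    simp

-- the core: A's chunked traversal flattens to B's flat traversal of the suffix
theorem pv_main (full : List Int) : ∀ (n : Nat) (xs : List Int) (s : Nat), xs.length ≤ n → full.drop s = xs → s % 10 = 0 →
    (PySem.List.pyRange (s : Int) (full.length : Int) 10).flatMap (fun i =>
      '\n' :: ("    ".toList ++
        (PySem.List.enumerate (PySem.List.slice full (some i) (some (i + 10))) 0).flatMap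
          (fun jt => PySem.Int.toChars jt.2 ++
            (if i + jt.1 + 1 < (full.length : Int) then ", ".toList else ",".toList))))
    = (PySem.List.enumerate xs (s : Int)).flatMap (fun kt =>
        (if PySem.Int.mod kt.1 10 == 0 then "\n    ".toList else []) ++
        (PySem.Int.toChars kt.2 ++
          (if kt.1 + 1 == (full.length : Int) then ",".toList else ", ".toList))) := by
  intro n
  induction n with
  | zero =>
    intro xs s hlen hdrop _
    have hxs : xs = [] := List.eq_nil_of_length_eq_zero (Nat.le_zero.mp hlen)
    subst hxs
    have hge : full.length ≤ s := List.drop_eq_nil_iff.mp hdrop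
    rw [PySem.List.pyRange_of_pos _ _ (by norm_num), if_neg (by exact_mod_cast not_lt.mpr (by exact_mod_cast hge))]
    simp [PySem.List.enumerate_nil]
  | succ n ih =>
    intro xs s hlen hdrop hs
    cases xs with
    | nil =>
      have hge : full.length ≤ s := List.drop_eq_nil_iff.mp hdrop
      rw [PySem.List.pyRange_of_pos _ _ (by norm_num), if_neg (by exact_mod_cast not_lt.mpr (by exact_mod_cast hge))]
      simp [PySem.List.enumerate_nil]
    | cons x rest =>
      have hslt : s < full.length := by
        by_contra hcon
        rw [List.drop_eq_nil_iff.mpr (by omega)] at hdrop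
        exact List.cons_ne_nil _ _ hdrop.symm
      have hflen : full.length = s + 1 + rest.length := by
        have := congrArg List.length hdrop
        simp [List.length_drop] at this
        omega
      -- peel the first chunk on the A side
      rw [pv_pyRange_ten_cons _ _ (by exact_mod_cast hslt), List.flatMap_cons]
      -- the chunk is xs.take 10 = x :: rest.take 9
      have hcast10 : ((s : Int) + 10) = ((s + 10 : Nat) : Int) := by push_cast; ring
      have hchunk : PySem.List.slice full (some (s : Int)) (some ((s : Int) + 10))
          = x :: rest.take 9 := by
        rw [hcast10, PySem.List.slice_natCast, hdrop]
        have : s + 10 - s = 10 := by omega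
        rw [this]
        rfl
      rw [hchunk, PySem.List.enumerate_cons, List.flatMap_cons]
      -- head separator of the chunk
      have hsephead : (if (s : Int) + (0 : Int) + 1 < (full.length : Int) then ", ".toList else ",".toList)
          = (if ((s : Int)) + 1 == (full.length : Int) then ",".toList else ", ".toList) := by
        by_cases he : (s : Int) + 1 = (full.length : Int)
        · rw [if_neg (by omega), if_pos (by simpa using he)]
        · rw [if_pos (by omega), if_neg (by simpa using he)]
      -- tail of the chunk via pv_chunk_tail
      have htail := pv_chunk_tail (full.length : Int) (rest.take 9) (s : Int) 1
        (by positivity) (by exact_mod_cast Nat.dvd_of_mod_eq_zero hs)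
        le_rfl (by simp only [List.length_take]; omega)
        (by
          have : (rest.take 9).length ≤ rest.length := by simp only [List.length_take]; omega
          omega)
      -- B side: split the enumeration at the chunk boundary
      have hsplit : rest = rest.take 9 ++ rest.drop 9 := (List.take_append_drop 9 rest).symm
      rw [PySem.List.enumerate_cons]
      conv_rhs => rw [hsplit]
      rw [PySem.List.enumerate_append, List.flatMap_cons, List.flatMap_append]
      -- the second enumeration starts at s + 10 (or is empty)
      have hstart : PySem.List.enumerate (rest.drop 9) ((s : Int) + 1 + ((rest.take 9).length : Int))
          = PySem.List.enumerate (rest.drop 9) ((s + 10 : Nat) : Int) := by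
        by_cases h9 : 9 ≤ rest.length
        · have : (rest.take 9).length = 9 := by simp only [List.length_take]; omega
          rw [this]
          congr 1
        · have : rest.drop 9 = [] := List.drop_eq_nil_iff.mpr (by omega)
          rw [this, PySem.List.enumerate_nil, PySem.List.enumerate_nil]
      rw [hstart]
      -- recursive call
      have hdrop' : full.drop (s + 10) = rest.drop 9 := by
        have h1 : full.drop (s + 10) = (full.drop s).drop 10 := by
          rw [List.drop_drop]
        rw [h1, hdrop]
        rfl
      have hlen' : (rest.drop 9).length ≤ n := by
        simp only [List.length_cons] at hlen
        simp [List.length_drop]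
        omega
      have hrec := ih (rest.drop 9) (s + 10) hlen' hdrop' (by omega)
      rw [hcast10, hrec]
      -- head prefix on the B side fires (s is a multiple of 10)
      have hmod : (PySem.Int.mod (s : Int) 10 == 0) = true := by
        simp only [beq_iff_eq, PySem.Int.mod_eq_zero_iff_dvd]
        exact_mod_cast (Nat.dvd_of_mod_eq_zero hs : (10 : Nat) ∣ s)
      rw [if_pos hmod]
      simp only [zero_add]
      rw [htail]
      simp only [List.append_assoc]
      simp
      by_cases he : (s : Int) + 1 = (full.length : Int)
      · rw [if_neg (by omega), if_pos he]
      · rw [if_pos (by omega), if_neg he]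

-- ''.join flattens a flatMap of piece lists
theorem pv_flatten_flatMap {α : Type} (l : List α) (g : α → List (List Char)) :
    (l.flatMap g).flatten = l.flatMap (fun x => (g x).flatten) := by
  induction l with
  | nil => simp
  | cons x xs ih => simp [ih]

-- ===== VERDICT =====
theorem format_zig_array_spec : Claim_equal_format_zig_array := by
  intro token_ids _
  unfold Spec_format_zig_array format_zig_array format_zig_array_alt
  simp only []
  -- A side: outer fold appends one line per chunk
  rw [PySem.List.foldl_append_singleton_eq_map]
  -- A side: each inner fold appends one piece per token
  have hfA : ∀ i : Int,
      (fun (parts : List (List Char)) (jt : Int × Int) =>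
        if i + jt.1 + 1 < (token_ids.length : Int)
        then parts ++ [PySem.Int.toChars jt.2 ++ ", ".toList]
        else parts ++ [PySem.Int.toChars jt.2 ++ ",".toList])
      = (fun parts jt => parts ++ [PySem.Int.toChars jt.2 ++
          (if i + jt.1 + 1 < (token_ids.length : Int) then ", ".toList else ",".toList)]) := by
    intro i
    funext parts jt
    by_cases h : i + jt.1 + 1 < (token_ids.length : Int) <;> simp [h]
  have hmapA : (PySem.List.pyRange 0 (token_ids.length : Int) 10).map (fun i =>
        "    ".toList ++ PySem.Chars.join []
          ((PySem.List.enumerate (PySem.List.slice token_ids (some i) (some (i + 10))) 0).foldl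
            (fun parts jt =>
              if i + jt.1 + 1 < (token_ids.length : Int)
              then parts ++ [PySem.Int.toChars jt.2 ++ ", ".toList]
              else parts ++ [PySem.Int.toChars jt.2 ++ ",".toList]) []))
      = (PySem.List.pyRange 0 (token_ids.length : Int) 10).map (fun i =>
          "    ".toList ++
            (PySem.List.enumerate (PySem.List.slice token_ids (some i) (some (i + 10))) 0).flatMap
              (fun jt => PySem.Int.toChars jt.2 ++
                (if i + jt.1 + 1 < (token_ids.length : Int) then ", ".toList else ",".toList))) := by
    apply List.map_congr_left
    intro i _
    rw [hfA i, PySem.List.foldl_append_singleton_eq_map, List.nil_append, pv_join_nil]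
    rw [List.flatMap_def]
  rw [hmapA]
  -- B side: each step appends a break (maybe) and one piece
  have hfB : (fun (out : List (List Char)) (kt : Int × Int) =>
        (if PySem.Int.mod kt.1 10 == 0 then out ++ ["
    ".toList] else out) ++
          [PySem.Int.toChars kt.2 ++
            (if kt.1 + 1 == (token_ids.length : Int) then ",".toList else ", ".toList)])
      = (fun out kt => out ++
          ((if PySem.Int.mod kt.1 10 == 0 then ["
    ".toList] else []) ++
            [PySem.Int.toChars kt.2 ++
              (if kt.1 + 1 == (token_ids.length : Int) then ",".toList else ", ".toList)])) := by
    funext out kt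
    by_cases h : (PySem.Int.mod kt.1 10 == 0) = true
    · rw [if_pos h, if_pos h]; simp
    · rw [if_neg h, if_neg h]; simp
  rw [hfB, PySem.List.foldl_append_eq_flatMap]
  -- both joins become flattenings
  rw [pv_join_nil]
  -- newline-join on the A side
  rw [List.cons_append, List.cons_append, List.cons_append, pv_join_newline]
  -- B side: flatten distributes over the three segments and over the flatMap
  rw [List.flatten_append, List.flatten_append, pv_flatten_flatMap]
  have hgB : (fun (kt : Int × Int) =>
        ((if PySem.Int.mod kt.1 10 == 0 then ["\n    ".toList] else []) ++
          [PySem.Int.toChars kt.2 ++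
            (if kt.1 + 1 == (token_ids.length : Int) then ",".toList else ", ".toList)]).flatten)
      = (fun kt => (if PySem.Int.mod kt.1 10 == 0 then "\n    ".toList else []) ++
          (PySem.Int.toChars kt.2 ++
            (if kt.1 + 1 == (token_ids.length : Int) then ",".toList else ", ".toList))) := by
    funext kt
    by_cases h : (PySem.Int.mod kt.1 10 == 0) = true
    · rw [if_pos h, if_pos h]; simp
    · rw [if_neg h, if_neg h]; simp
  rw [hgB]
  -- A side: distribute the newline prefix over the line list
  simp only [List.flatMap_cons, List.flatMap_append, List.flatMap_nil, List.flatMap_map,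
    List.flatten_cons, List.flatten_nil]
  -- the core equality of the two traversals (s = 0)
  have hmain := pv_main token_ids token_ids.length token_ids 0 le_rfl rfl rfl
  simp only [Nat.cast_zero] at hmain
  rw [← hmain]
  -- remaining: the fixed literal glue around the shared middle part
  congr 1
  simp only [List.append_assoc, List.nil_append, List.append_nil, List.cons_append]
  rfl
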